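-- pv_equiv track=rewrite | github.com/ethras/flow-maestro | src/flowm_cli/projects.py | _remove_existing_entry
-- ===== SOURCE A (Python) =====
-- from typing import Dict, List, Optional, Tuple
--
-- def _section_end(lines: List[str], start_idx: int) -> int:
--     idx = start_idx + 1
--     while idx < len(lines):
--         if lines[idx].startswith("## "):
--             break
--         idx += 1
--     return idx
--
-- def _remove_existing_entry(
--     lines: List[str],
--     start_idx: int,
--     end_idx: int,
--     title: str,
-- ) -> Tuple[bool, int]:
--     idx = start_idx + 1
--     lowered = title.lower()
--     while idx < end_idx:
--         line = lines[idx]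
--         if line.startswith("- Title: "):
--             current_title = line[len("- Title: ") :].strip().lower()
--             block_start = idx
--             idx += 1
--             while idx < end_idx and not lines[idx].startswith("- Title: ") and not lines[idx].startswith("## "):
--                 idx += 1
--             block_end = idx
--             if current_title == lowered:
--                 del lines[block_start:block_end]
--                 return True, _section_end(lines, start_idx)
--             continue
--         idx += 1
--     return False, end_idx
-- ===== SOURCE B (Python) =====
-- from typing import List, Tuple
--
--
-- def _section_end(lines: List[str], start_idx: int) -> int:
--     idx = start_idx + 1
--     while idx < len(lines):
--         if lines[idx].startswith("## "):
--             break
--         idx += 1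
--     return idx
--
--
-- def _remove_existing_entry(
--     lines: List[str],
--     start_idx: int,
--     end_idx: int,
--     title: str,
-- ) -> Tuple[bool, int]:
--     prefix = "- Title: "
--     # Pass 1: parse the region into blocks (start, end-or-None, lowered title).
--     blocks = []
--     for i in range(start_idx + 1, end_idx):
--         line = lines[i]
--         if line.startswith(prefix):
--             if blocks and blocks[-1][1] is None:
--                 blocks[-1][1] = i
--             blocks.append([i, None, line[len(prefix):].strip().lower()])
--         elif line.startswith("## "):
--             if blocks and blocks[-1][1] is None:
--                 blocks[-1][1] = i
--     if blocks and blocks[-1][1] is None: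
--         blocks[-1][1] = end_idx
--     # Pass 2: search the block index for the first matching title.
--     lowered = title.lower()
--     for bs, be, low in blocks:
--         if low == lowered:
--             del lines[bs:be]
--             return True, _section_end(lines, start_idx)
--     return False, end_idx
-- ===== Notes on version B (the rewrite author's own statement) =====
-- stated objective: alternative
-- what changed: B replaces A's interleaved scan-compare-delete loop (with an inner while per block and continue) by a parse-then-search decomposition: one pass builds an explicit index of blocks (start, end, lowered title), then a separate linear search over that index picks the first match and performs the same in-place del.
-- outside the precondition, e.g. on _remove_existing_entry(['- Title: x', '## s'], -1, 5, 'x'): A returns (True, 0), B raises IndexError; on _remove_existing_entry(['a', 'b'], -3, 0, 't'): A returns (False, 0), B returns (False, 0)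
import Mathlib
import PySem

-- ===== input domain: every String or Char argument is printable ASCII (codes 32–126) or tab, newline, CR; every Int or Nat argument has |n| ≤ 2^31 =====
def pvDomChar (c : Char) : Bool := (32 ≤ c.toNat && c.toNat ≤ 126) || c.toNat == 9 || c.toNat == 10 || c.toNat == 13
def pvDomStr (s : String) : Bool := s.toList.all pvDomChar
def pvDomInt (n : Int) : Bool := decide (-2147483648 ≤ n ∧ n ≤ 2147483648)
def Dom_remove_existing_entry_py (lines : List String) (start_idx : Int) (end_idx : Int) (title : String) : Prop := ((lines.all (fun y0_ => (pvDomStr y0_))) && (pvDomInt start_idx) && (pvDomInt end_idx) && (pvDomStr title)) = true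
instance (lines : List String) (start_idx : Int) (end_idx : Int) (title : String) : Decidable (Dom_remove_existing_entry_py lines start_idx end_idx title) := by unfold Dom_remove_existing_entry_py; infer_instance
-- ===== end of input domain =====

-- B replaces A's interleaved scan-compare-delete loop by a parse-then-search decomposition
-- (build an explicit block index in one pass, then search it); same cost, different structure.
-- Both Pythons mutate `lines` in place via the same `del lines[bs:be]`; the theorem is about the return value.

-- ===== PORT A =====
-- shared helper: _section_end (called by both Pythons); the Nat fuel only bounds the
-- iteration count of the while loop (lines.length is always enough), it changes no value
def sectionEndLoop (lines : List String) : Nat → Int → Int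
  | 0, idx => idx
  | fuel + 1, idx =>
    if idx < (lines.length : Int) then
      if PySem.Str.startswith (PySem.List.pyGetD lines idx "") "## " then idx
      else sectionEndLoop lines fuel (idx + 1)
    else idx

def section_end_py (lines : List String) (start_idx : Int) : Int :=
  sectionEndLoop lines lines.length (start_idx + 1)

-- shared helper: `del lines[a:b]` (Python's slice deletion keeps lines[:a] and lines[b:])
def pyDelSlice (lines : List String) (a b : Int) : List String :=
  PySem.List.slice lines none (some a) ++ PySem.List.slice lines (some b) none

-- A's inner while loop: advance idx while it is < end_idx and the line is no block boundary
def aSkip (lines : List String) (end_idx : Int) : Nat → Int → Int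
  | 0, idx => idx
  | fuel + 1, idx =>
    if idx < end_idx then
      if ¬ PySem.Str.startswith (PySem.List.pyGetD lines idx "") "- Title: " ∧
         ¬ PySem.Str.startswith (PySem.List.pyGetD lines idx "") "## " then
        aSkip lines end_idx fuel (idx + 1)
      else idx
    else idx

-- A's outer while loop (fuel = number of remaining indices, (end_idx - idx).toNat at the top call)
def aLoop (lines : List String) (start_idx end_idx : Int) (lowered : String) : Nat → Int → Bool × Int
  | 0, _ => (false, end_idx)
  | fuel + 1, idx =>
    if idx < end_idx then
      let line := PySem.List.pyGetD lines idx ""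
      if PySem.Str.startswith line "- Title: " then
        let current_title := PySem.Str.lower (PySem.Str.strip (PySem.Str.slice line (some 9) none))
        let block_start := idx
        let block_end := aSkip lines end_idx fuel (idx + 1)
        if current_title = lowered then
          (true, section_end_py (pyDelSlice lines block_start block_end) start_idx)
        else
          aLoop lines start_idx end_idx lowered fuel block_end
      else
        aLoop lines start_idx end_idx lowered fuel (idx + 1)
    else (false, end_idx)

def remove_existing_entry_py (lines : List String) (start_idx : Int) (end_idx : Int) (title : String) : Bool × Int :=
  aLoop lines start_idx end_idx (PySem.Str.lower title) ((end_idx - (start_idx + 1)).toNat) (start_idx + 1)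

-- ===== PORT B =====
-- a parsed block: (block_start, block_end or none while still open, lowered title)
-- `if blocks and blocks[-1][1] is None: blocks[-1][1] = i` — close the last block if it is open
def bClose (i : Int) : List (Int × Option Int × String) → List (Int × Option Int × String)
  | [] => []
  | [b] => if b.2.1 = none then [(b.1, some i, b.2.2)] else [b]
  | b :: rest => b :: bClose i rest

-- one step of B's parsing pass
def bStep (lines : List String) (blocks : List (Int × Option Int × String)) (i : Int) :
    List (Int × Option Int × String) :=
  let line := PySem.List.pyGetD lines i ""
  if PySem.Str.startswith line "- Title: " then
    bClose i blocks ++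
      [(i, none, PySem.Str.lower (PySem.Str.strip (PySem.Str.slice line (some 9) none)))]
  else if PySem.Str.startswith line "## " then
    bClose i blocks
  else blocks

-- B's second pass: first block whose lowered title matches (after parsing, every block_end is some)
def bSearch (lines : List String) (start_idx end_idx : Int) (lowered : String) :
    List (Int × Option Int × String) → Bool × Int
  | [] => (false, end_idx)
  | (bs, be, low) :: rest =>
    if low = lowered then
      (true, section_end_py (pyDelSlice lines bs (be.getD end_idx)) start_idx)
    else bSearch lines start_idx end_idx lowered rest

def remove_existing_entry_py_alt (lines : List String) (start_idx : Int) (end_idx : Int) (title : String) : Bool × Int :=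
  let blocks := (PySem.List.pyRange (start_idx + 1) end_idx 1).foldl (bStep lines) []
  let blocks := bClose end_idx blocks
  bSearch lines start_idx end_idx (PySem.Str.lower title) blocks

-- ===== PRECONDITION & SPEC =====
-- Pre_ excludes inputs whose scan region [start_idx+1, end_idx) leaves the list's index range
-- (start_idx < -1 or end_idx > len(lines) while the loop runs): there Python's IndexError /
-- negative-index wraparound makes the behaviour accidental; A usually raises (and B always
-- raises when A's early return is what saves A from reaching the out-of-range index).
def Pre_remove_existing_entry_py (lines : List String) (start_idx : Int) (end_idx : Int) (title : String) : Prop :=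
  start_idx + 1 < end_idx → (-1 ≤ start_idx ∧ end_idx ≤ (lines.length : Int))
instance (lines : List String) (start_idx : Int) (end_idx : Int) (title : String) : Decidable (Pre_remove_existing_entry_py lines start_idx end_idx title) := by unfold Pre_remove_existing_entry_py; infer_instance

def pvWitness_remove_existing_entry_py : List String × Int × Int × String :=
  (["## S", "- Title: Foo", "body", "## T"], 0, 3, "foo")

def Spec_remove_existing_entry_py (lines : List String) (start_idx : Int) (end_idx : Int) (title : String) (out : Bool × Int) : Prop := out = remove_existing_entry_py_alt lines start_idx end_idx title
instance (lines : List String) (start_idx : Int) (end_idx : Int) (title : String) (out : Bool × Int) : Decidable (Spec_remove_existing_entry_py lines start_idx end_idx title out) := by unfold Spec_remove_existing_entry_py; infer_instance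

-- ===== CLAIM (what is proved, stated in full; the proofs are below) =====
def Claim_equal_remove_existing_entry_py : Prop := ∀ (lines : List String) (start_idx : Int) (end_idx : Int) (title : String), Dom_remove_existing_entry_py lines start_idx end_idx title → Pre_remove_existing_entry_py lines start_idx end_idx title → Spec_remove_existing_entry_py lines start_idx end_idx title (remove_existing_entry_py lines start_idx end_idx title)

-- ===== LEMMAS AND PROOFS =====

-- reference decomposition: the block list of the region [idx, end_idx), with closed ends
def spine (lines : List String) (end_idx : Int) : Nat → Int → List (Int × Int × String)
  | 0, _ => []
  | fuel + 1, idx =>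
    if idx < end_idx then
      let line := PySem.List.pyGetD lines idx ""
      if PySem.Str.startswith line "- Title: " then
        let be := aSkip lines end_idx fuel (idx + 1)
        (idx, be, PySem.Str.lower (PySem.Str.strip (PySem.Str.slice line (some 9) none))) ::
          spine lines end_idx fuel be
      else spine lines end_idx fuel (idx + 1)
    else []

def spineSearch (lines : List String) (start_idx end_idx : Int) (lowered : String) :
    List (Int × Int × String) → Bool × Int
  | [] => (false, end_idx)
  | (bs, be, low) :: rest =>
    if low = lowered then
      (true, section_end_py (pyDelSlice lines bs be) start_idx)
    else spineSearch lines start_idx end_idx lowered rest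

theorem aLoop_eq_spineSearch (lines : List String) (start_idx end_idx : Int) (lowered : String) :
    ∀ (fuel : Nat) (idx : Int),
      aLoop lines start_idx end_idx lowered fuel idx =
        spineSearch lines start_idx end_idx lowered (spine lines end_idx fuel idx) := by
  intro fuel
  induction fuel with
  | zero => intro idx; rfl
  | succ fuel ih =>
    intro idx
    show (if idx < end_idx then _ else (false, end_idx)) = _
    by_cases h : idx < end_idx
    · rw [if_pos h]
      simp only [spine, if_pos h]
      by_cases hT : PySem.Str.startswith (PySem.List.pyGetD lines idx "") "- Title: " = true
      · rw [if_pos hT, if_pos hT]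
        by_cases hm : PySem.Str.lower (PySem.Str.strip
            (PySem.Str.slice (PySem.List.pyGetD lines idx "") (some 9) none)) = lowered
        · rw [if_pos hm]
          simp only [spineSearch, if_pos hm]
        · rw [if_neg hm]
          simp only [spineSearch, if_neg hm]
          exact ih _
      · rw [if_neg hT, if_neg hT]
        exact ih _
    · rw [if_neg h]
      simp only [spine, if_neg h, spineSearch]

-- aSkip characterisation: everything strictly inside the skipped region is a plain line …
theorem aSkip_clean (lines : List String) (e : Int) :
    ∀ (fuel : Nat) (idx j : Int), idx ≤ j → j < aSkip lines e fuel idx →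
      PySem.Str.startswith (PySem.List.pyGetD lines j "") "- Title: " = false ∧
        PySem.Str.startswith (PySem.List.pyGetD lines j "") "## " = false := by
  intro fuel
  induction fuel with
  | zero => intro idx j h1 h2; simp only [aSkip] at h2; omega
  | succ fuel ih =>
    intro idx j h1 h2
    simp only [aSkip] at h2
    by_cases hlt : idx < e
    · rw [if_pos hlt] at h2
      by_cases hc : ¬ PySem.Str.startswith (PySem.List.pyGetD lines idx "") "- Title: " = true ∧
          ¬ PySem.Str.startswith (PySem.List.pyGetD lines idx "") "## " = true
      · rw [if_pos hc] at h2
        rcases eq_or_lt_of_le h1 with rfl | hgt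
        · exact ⟨by simpa using hc.1, by simpa using hc.2⟩
        · exact ih (idx + 1) j (by omega) h2
      · rw [if_neg hc] at h2; omega
    · rw [if_neg hlt] at h2; omega

-- … the skip stays below idx+steps and at or below e …
theorem le_aSkip (lines : List String) (e : Int) :
    ∀ (fuel : Nat) (idx : Int), idx ≤ aSkip lines e fuel idx := by
  intro fuel
  induction fuel with
  | zero => intro idx; simp [aSkip]
  | succ fuel ih =>
    intro idx
    simp only [aSkip]
    split
    · split
      · have := ih (idx + 1); omega
      · omega
    · omega

theorem aSkip_le (lines : List String) (e : Int) :
    ∀ (fuel : Nat) (idx : Int), idx ≤ e → aSkip lines e fuel idx ≤ e := by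
  intro fuel
  induction fuel with
  | zero => intro idx h; simpa [aSkip] using h
  | succ fuel ih =>
    intro idx h
    simp only [aSkip]
    split
    · split
      · exact ih (idx + 1) (by omega)
      · omega
    · omega

-- … and, with enough fuel, if it stops before e it stops at a boundary line
theorem aSkip_stop (lines : List String) (e : Int) :
    ∀ (fuel : Nat) (idx : Int), (e - idx).toNat ≤ fuel → aSkip lines e fuel idx < e →
      PySem.Str.startswith (PySem.List.pyGetD lines (aSkip lines e fuel idx) "") "- Title: " = true ∨
        PySem.Str.startswith (PySem.List.pyGetD lines (aSkip lines e fuel idx) "") "## " = true := by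
  intro fuel
  induction fuel with
  | zero => intro idx hf h; simp only [aSkip] at h; omega
  | succ fuel ih =>
    intro idx hf h
    simp only [aSkip] at h ⊢
    by_cases hlt : idx < e
    · rw [if_pos hlt] at h ⊢
      by_cases hc : ¬ PySem.Str.startswith (PySem.List.pyGetD lines idx "") "- Title: " = true ∧
          ¬ PySem.Str.startswith (PySem.List.pyGetD lines idx "") "## " = true
      · rw [if_pos hc] at h ⊢
        exact ih (idx + 1) (by omega) h
      · rw [if_neg hc] at h ⊢
        rcases Decidable.not_and_iff_not_or_not.mp hc with hA | hB
        · exact Or.inl (by simpa using hA)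
        · exact Or.inr (by simpa using hB)
    · rw [if_neg hlt] at h; omega

def allClosed (l : List (Int × Option Int × String)) : Prop := ∀ b ∈ l, b.2.1 ≠ none

theorem bClose_append (i : Int) (B0 l : List (Int × Option Int × String))
    (h : allClosed B0) : bClose i (B0 ++ l) = B0 ++ bClose i l := by
  induction B0 with
  | nil => rfl
  | cons b B0' ih =>
    have hb : b.2.1 ≠ none := h b (by simp)
    have h' : allClosed B0' := fun x hx => h x (by simp [hx])
    cases hBl : B0' ++ l with
    | nil =>
      rcases List.append_eq_nil_iff.mp hBl with ⟨rfl, rfl⟩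
      simp [bClose, hb]
    | cons c rest =>
      calc bClose i (b :: (B0' ++ l)) = b :: bClose i (B0' ++ l) := by
            rw [hBl]; rfl
        _ = b :: (B0' ++ bClose i l) := by rw [ih h']
        _ = (b :: B0') ++ bClose i l := rfl

theorem foldl_bStep_append (lines : List String) (r : List Int)
    (B0 acc : List (Int × Option Int × String)) (h : allClosed B0) :
    r.foldl (bStep lines) (B0 ++ acc) = B0 ++ r.foldl (bStep lines) acc := by
  induction r generalizing acc with
  | nil => rfl
  | cons i r' ih =>
    have hstep : bStep lines (B0 ++ acc) i = B0 ++ bStep lines acc i := by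
      simp only [bStep]
      split
      · rw [bClose_append i B0 acc h, List.append_assoc]
      · split
        · rw [bClose_append i B0 acc h]
        · rfl
    simp only [List.foldl_cons, hstep, ih]

theorem foldl_bStep_clean (lines : List String) (a b : Int)
    (acc : List (Int × Option Int × String))
    (h : ∀ j, a ≤ j → j < b →
      PySem.Str.startswith (PySem.List.pyGetD lines j "") "- Title: " = false ∧
        PySem.Str.startswith (PySem.List.pyGetD lines j "") "## " = false) :
    (PySem.List.pyRange a b 1).foldl (bStep lines) acc = acc := by
  by_cases hab : a < b
  · rw [PySem.List.pyRange_one_cons hab, List.foldl_cons]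
    have ha := h a (le_refl a) hab
    have hstep : bStep lines acc a = acc := by
      simp only [bStep]; rw [if_neg (by simpa using ha.1), if_neg (by simpa using ha.2)]
    rw [hstep]
    exact foldl_bStep_clean lines (a + 1) b acc (fun j hj1 hj2 => h j (by omega) hj2)
  · rw [PySem.List.pyRange_one_eq_nil (by omega)]; rfl
termination_by (b - a).toNat
decreasing_by omega

def closeAll : List (Int × Int × String) → List (Int × Option Int × String) :=
  List.map (fun x => (x.1, some x.2.1, x.2.2))

theorem spine_at_end (lines : List String) (e : Int) (fuel : Nat) (idx : Int) (h : ¬ idx < e) :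
    spine lines e fuel idx = [] := by
  cases fuel with
  | zero => rfl
  | succ fuel => simp only [spine, if_neg h]

-- B's parsing pass produces exactly the reference block list
theorem parse_eq_spine (lines : List String) (e : Int) :
    ∀ (fuel : Nat) (idx : Int), (e - idx).toNat ≤ fuel →
      bClose e ((PySem.List.pyRange idx e 1).foldl (bStep lines) []) =
        closeAll (spine lines e fuel idx) := by
  intro fuel
  induction fuel using Nat.strong_induction_on with
  | _ fuel ihs =>
    intro idx hfuel
    by_cases h : idx < e
    · obtain ⟨g, rfl⟩ : ∃ g, fuel = g + 1 := ⟨fuel - 1, by omega⟩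
      have ih := ihs g (by omega)
      simp only [spine, if_pos h]
      by_cases hT : PySem.Str.startswith (PySem.List.pyGetD lines idx "") "- Title: " = true
      · rw [if_pos hT]
        set be := aSkip lines e g (idx + 1) with hbe_def
        have hbe1 : idx + 1 ≤ be := le_aSkip lines e g (idx + 1)
        have hbe2 : be ≤ e := aSkip_le lines e g (idx + 1) (by omega)
        set low := PySem.Str.lower (PySem.Str.strip
          (PySem.Str.slice (PySem.List.pyGetD lines idx "") (some 9) none)) with hlow_def
        rw [PySem.List.pyRange_one_cons h, List.foldl_cons]
        have hstep0 : bStep lines [] idx = [(idx, none, low)] := by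
          simp only [bStep]; rw [if_pos hT]; rfl
        rw [hstep0]
        rw [PySem.List.pyRange_one_append (idx + 1) be e hbe1 hbe2, List.foldl_append]
        rw [foldl_bStep_clean lines (idx + 1) be [(idx, none, low)]
          (fun j hj1 hj2 => aSkip_clean lines e g (idx + 1) j hj1 hj2)]
        by_cases hbe : be < e
        · -- the block is closed by the next boundary line
          have hstop := aSkip_stop lines e g (idx + 1) (by omega) hbe
          have hone : allClosed [(idx, some be, low)] := by
            intro x hx; simp at hx; simp [hx]
          have hsplit : (PySem.List.pyRange be e 1).foldl (bStep lines) [(idx, none, low)] =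
              [(idx, some be, low)] ++ (PySem.List.pyRange be e 1).foldl (bStep lines) [] := by
            rw [PySem.List.pyRange_one_cons hbe, List.foldl_cons, List.foldl_cons]
            by_cases hA : PySem.Str.startswith (PySem.List.pyGetD lines be "") "- Title: " = true
            · have h1 : bStep lines [(idx, none, low)] be =
                  [(idx, some be, low)] ++ bStep lines [] be := by
                simp only [bStep]; rw [if_pos hA, if_pos hA]; rfl
              rw [h1]
              exact foldl_bStep_append lines _ [(idx, some be, low)] _ hone
            · have hB : PySem.Str.startswith (PySem.List.pyGetD lines be "") "## " = true := by
                rcases hstop with h' | h'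
                · exact absurd h' hA
                · exact h'
              have h1 : bStep lines [(idx, none, low)] be =
                  [(idx, some be, low)] ++ bStep lines [] be := by
                simp only [bStep]; rw [if_neg hA, if_pos hB, if_neg hA, if_pos hB]; rfl
              rw [h1]
              exact foldl_bStep_append lines _ [(idx, some be, low)] _ hone
          rw [hsplit, bClose_append e [(idx, some be, low)] _ hone]
          rw [ih be (by omega)]
          rfl
        · -- the block runs to end_idx and is closed by the final fix-up
          have hbee : be = e := by omega
          simp only [hbee, PySem.List.pyRange_one_eq_nil (le_refl e), List.foldl_nil,
            spine_at_end lines e g e (by omega)]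
          simp [bClose, closeAll]
      · rw [if_neg hT]
        rw [PySem.List.pyRange_one_cons h, List.foldl_cons]
        have hstep : bStep lines [] idx = [] := by
          simp only [bStep]; rw [if_neg hT]; split <;> rfl
        rw [hstep]
        exact ih (idx + 1) (by omega)
    · rw [spine_at_end lines e fuel idx h, PySem.List.pyRange_one_eq_nil (by omega),
        List.foldl_nil]
      rfl

-- B's search over the closed block list is the reference search
theorem bSearch_closeAll (lines : List String) (s e : Int) (lw : String)
    (sp : List (Int × Int × String)) :
    bSearch lines s e lw (closeAll sp) = spineSearch lines s e lw sp := by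
  induction sp with
  | nil => rfl
  | cons x rest ih =>
    obtain ⟨bs, be, low⟩ := x
    by_cases hm : low = lw
    · simp [closeAll, bSearch, spineSearch, hm]
    · simp only [closeAll, List.map_cons, bSearch, spineSearch]
      rw [if_neg hm, if_neg hm]
      exact ih

-- ===== VERDICT (by name: the statement is the Claim_ definition above) =====
theorem remove_existing_entry_py_spec : Claim_equal_remove_existing_entry_py := by
  intro lines start_idx end_idx title _hdom _hpre
  unfold Spec_remove_existing_entry_py remove_existing_entry_py remove_existing_entry_py_alt
  rw [aLoop_eq_spineSearch]
  show spineSearch _ _ _ _ _ =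
    bSearch lines start_idx end_idx (PySem.Str.lower title)
      (bClose end_idx ((PySem.List.pyRange (start_idx + 1) end_idx 1).foldl (bStep lines) []))
  rw [parse_eq_spine lines end_idx ((end_idx - (start_idx + 1)).toNat) (start_idx + 1) (le_refl _),
    bSearch_closeAll]
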